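-- pv_equiv track=rewrite | github.com/ajborla/py-lib-dqstutil | dqstutil/dqstutil.py | remove_columns
-- ===== SOURCE A (Python) =====
-- def _is_valid_colnames(header, colnames):
--     """
--     Validate column names against header.
--
--     Given a list of column name, `colnames`, returns True if each
--     element is also in the list, `header`.
--
--     :param header: list
--     :param colnames: list
--
--     :return: bool
--     """
--     return \
--         isinstance(header, list) \
--         and len(header) > 0 \
--         and isinstance(colnames, list) \
--         and len(colnames) > 0 \
--         and all(map(lambda x: x in header, colnames))
--
-- def remove_columns(dataset, header, colnames, inplace=False):
--     """
--     Remove a set of columns from a dataset.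
--
--     Given a `dataset`, its `header`, and a list of column names,
--     `colnames`, removes the nominated columns from `dataset` and
--     from the `header`. A copy of the dataset, and of the header,
--     is modified and returned, unless `inplace` is True, in
--     which case, the original dataset and original header, with
--     modifications, are returned. Note dataset copy is a copy of
--     the container and copies of the elements too.
--
--     :param dataset: list
--     :param header: list
--     :param colnames: list
--     :param inplace: bool
--
--     :return: list, list|None, None
--     """
--     if _is_valid_colnames(header, colnames):
--         # `inplace` flag determines whether originals or copies
--         # modified
--         dataset = dataset if inplace else [x[:] for x in dataset]
--         header = header if inplace else header[:]
--         # Reverse column names to ensure higher indexes deleted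
--         # before lower indexes, else for-loop traversal is
--         # compromised
--         idxs = []
--         for colname in colnames:
--             idxs.append(header.index(colname))
--         idxs.sort(key=int, reverse=True)
--         # Perform column deletion dataset, update header
--         for row in dataset:
--             for idx in idxs:
--                 del row[idx]
--         for idx in idxs:
--             del header[idx]
--         return dataset, header
--     # Fallthrough case
--     return None, None
-- ===== SOURCE B (Python) =====
-- def remove_columns(dataset, header, colnames, inplace=False):
--     if not (isinstance(header, list) and len(header) > 0
--             and isinstance(colnames, list) and len(colnames) > 0
--             and all(c in header for c in colnames)):
--         return None, None
--     # one pass: the set of column indices to drop, then filter every row once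
--     drop = {header.index(c) for c in colnames}
--     new_rows = [[x for i, x in enumerate(row) if i not in drop] for row in dataset]
--     new_header = [x for i, x in enumerate(header) if i not in drop]
--     if inplace:
--         for row, nr in zip(dataset, new_rows):
--             row[:] = nr
--         header[:] = new_header
--         return dataset, header
--     return new_rows, new_header
-- ===== Notes on version B (the rewrite author's own statement) =====
-- stated objective: alternative
-- what changed: Instead of repeatedly del-eting indices (sorted descending) from every row, B builds the set of dropped column indices once and filters each row and the header in a single enumerate pass.
-- outside the precondition, e.g. on remove_columns([['x', 'y']], ['a', 'b'], ['a', 'a'], False): A returns ([[]], []), B returns ([['y']], ['b']); on remove_columns([['x']], ['a', 'b'], ['b'], False): A raises IndexError, B returns ([['x']], ['a'])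
import Mathlib
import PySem

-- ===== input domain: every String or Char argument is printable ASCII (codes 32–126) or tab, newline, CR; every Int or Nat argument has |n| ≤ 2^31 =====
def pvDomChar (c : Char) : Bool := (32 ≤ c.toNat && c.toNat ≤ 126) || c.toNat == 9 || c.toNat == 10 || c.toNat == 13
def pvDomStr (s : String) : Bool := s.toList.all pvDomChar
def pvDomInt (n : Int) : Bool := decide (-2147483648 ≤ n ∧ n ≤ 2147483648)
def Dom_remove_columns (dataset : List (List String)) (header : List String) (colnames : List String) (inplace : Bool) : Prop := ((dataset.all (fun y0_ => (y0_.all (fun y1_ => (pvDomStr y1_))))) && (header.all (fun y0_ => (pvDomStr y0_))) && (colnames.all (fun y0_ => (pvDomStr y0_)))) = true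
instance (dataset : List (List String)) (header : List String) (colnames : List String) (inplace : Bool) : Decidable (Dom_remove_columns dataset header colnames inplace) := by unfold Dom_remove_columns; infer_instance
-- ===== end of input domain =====

-- B replaces A's per-row repeated descending-index deletions by one drop-set and a single
-- filtering pass per row (a different algorithm); equivalence is about the RETURN value only
-- (with inplace=True both Pythons mutate dataset rows and header the same way).


-- ===== PORT A =====
-- `header.index(c)` is only evaluated when c ∈ header (the guard), where List.idxOf is exact;
-- `del row[idx]` is List.eraseIdx (exact for idx < length; Python raises IndexError otherwise —
-- those inputs are excluded by Pre_). `inplace` only selects copying, which cannot affect the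
-- returned value in a pure port, so both ports ignore it.
def remove_columns (dataset : List (List String)) (header : List String) (colnames : List String) (inplace : Bool) : Option (List (List String)) × Option (List String) :=
  if 0 < header.length && 0 < colnames.length && colnames.all (fun c => header.contains c) then
    -- idxs = []; for colname in colnames: idxs.append(header.index(colname))
    let idxs : List Nat := colnames.foldl (fun acc c => acc ++ [header.idxOf c]) []
    -- idxs.sort(key=int, reverse=True)
    let idxs := PySem.List.sorted idxs (fun i => i) true
    -- for row in dataset: for idx in idxs: del row[idx]
    let ds := dataset.map (fun row => idxs.foldl (fun r i => r.eraseIdx i) row)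
    -- for idx in idxs: del header[idx]
    let hd := idxs.foldl (fun h i => h.eraseIdx i) header
    (some ds, some hd)
  else
    (none, none)

-- ===== PORT B =====
def remove_columns_alt (dataset : List (List String)) (header : List String) (colnames : List String) (inplace : Bool) : Option (List (List String)) × Option (List String) :=
  if 0 < header.length && 0 < colnames.length && colnames.all (fun c => header.contains c) then
    -- drop = {header.index(c) for c in colnames}
    let drop : PySem.Set Int := PySem.Set.ofList (colnames.map (fun c => (header.idxOf c : Int)))
    -- [[x for i, x in enumerate(row) if i not in drop] for row in dataset]
    let newRows := dataset.map (fun row =>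
      ((PySem.List.enumerate row 0).filter (fun p => !(PySem.Set.contains drop p.1))).map (fun p => p.2))
    -- [x for i, x in enumerate(header) if i not in drop]
    let newHeader := ((PySem.List.enumerate header 0).filter (fun p => !(PySem.Set.contains drop p.1))).map (fun p => p.2)
    (some newRows, some newHeader)
  else
    (none, none)

-- ===== PRECONDITION & SPEC =====
-- Pre_ excludes, among inputs passing A's validity guard: (a) rows too short for the deleted
-- indices (there Python A raises IndexError on `del row[idx]`), and (b) duplicate column names
-- (there A's cascading deletions delete additional, unnamed columns or raise — an accident of
-- deleting the same index twice — while B naturally drops each named column once).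
def Pre_remove_columns (dataset : List (List String)) (header : List String) (colnames : List String) (inplace : Bool) : Prop :=
  (0 < header.length ∧ 0 < colnames.length ∧ ∀ c ∈ colnames, c ∈ header) →
    (colnames.Nodup ∧ ∀ row ∈ dataset, ∀ c ∈ colnames, header.idxOf c < row.length)
instance (dataset : List (List String)) (header : List String) (colnames : List String) (inplace : Bool) : Decidable (Pre_remove_columns dataset header colnames inplace) := by unfold Pre_remove_columns; infer_instance

def pvWitness_remove_columns : List (List String) × List String × List String × Bool :=
  ([["x", "y"], ["u", "v"]], ["a", "b"], ["a"], false)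

def Spec_remove_columns (dataset : List (List String)) (header : List String) (colnames : List String) (inplace : Bool) (out : Option (List (List String)) × Option (List String)) : Prop := out = remove_columns_alt dataset header colnames inplace
instance (dataset : List (List String)) (header : List String) (colnames : List String) (inplace : Bool) (out : Option (List (List String)) × Option (List String)) : Decidable (Spec_remove_columns dataset header colnames inplace out) := by unfold Spec_remove_columns; infer_instance

-- ===== CLAIM (what is proved, stated in full; the proofs are below) =====
def Claim_equal_remove_columns : Prop := ∀ (dataset : List (List String)) (header : List String) (colnames : List String) (inplace : Bool), Dom_remove_columns dataset header colnames inplace → Pre_remove_columns dataset header colnames inplace → Spec_remove_columns dataset header colnames inplace (remove_columns dataset header colnames inplace)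

-- ===== LEMMAS AND PROOFS =====

-- "filter row by: original index (counted from s) not in S" — the shape of B's comprehension.
def pvFilt (s : Int) (row : List String) (S : List Int) : List String :=
  ((PySem.List.enumerate row s).filter (fun p => !(S.contains p.1))).map (fun p => p.2)

lemma pvFilt_all (s : Int) (row : List String) (S : List Int) (h : ∀ j ∈ S, j < s) :
    pvFilt s row S = row := by
  induction row generalizing s with
  | nil => rfl
  | cons x xs ih =>
      have hx : S.contains s = false := by
        simp only [List.contains_eq_mem, decide_eq_false_iff_not]
        intro hm; exact absurd (h s hm) (lt_irrefl s)
      simp only [pvFilt, PySem.List.enumerate_cons, List.filter_cons, hx, Bool.not_false]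
      have := ih (s + 1) (fun j hj => lt_trans (h j hj) (by omega))
      simpa [pvFilt] using congrArg (x :: ·) this

lemma pvFilt_cons (s : Int) (x : String) (xs : List String) (S : List Int) :
    pvFilt s (x :: xs) S =
      (if S.contains s then pvFilt (s + 1) xs S else x :: pvFilt (s + 1) xs S) := by
  simp only [pvFilt, PySem.List.enumerate_cons, List.filter_cons]
  cases hc : S.contains s <;> simp

lemma pvFilt_erase (row : List String) (s : Int) (m : Nat) (S : List Int)
    (h : ∀ j ∈ S, j < s + m) :
    pvFilt s (row.eraseIdx m) S = pvFilt s row ((s + m) :: S) := by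
  induction row generalizing s m with
  | nil => simp [pvFilt]
  | cons x xs ih =>
      cases m with
      | zero =>
          rw [List.eraseIdx_cons_zero, pvFilt_all s xs S (fun j hj => by simpa using h j hj),
            pvFilt_cons]
          rw [show ((s + ((0 : Nat) : Int)) :: S).contains s = true by simp, if_pos rfl]
          exact (pvFilt_all _ _ _ (by
            intro j hj
            rcases List.mem_cons.mp hj with h1 | h1
            · omega
            · have := h j h1; omega)).symm
      | succ k =>
          rw [List.eraseIdx_cons_succ, pvFilt_cons, pvFilt_cons]
          have hc : ((s + ((k + 1 : Nat) : Int)) :: S).contains s = S.contains s := by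
            simp only [List.contains_cons]
            rw [show (s == s + ((k + 1 : Nat) : Int)) = false by
              simp only [beq_eq_false_iff_ne, ne_eq]; intro hcon; omega]
            simp
          rw [hc]
          have ihh := ih (s + 1) k (by intro j hj; have := h j hj; push_cast at this ⊢; omega)
          rw [show (s + 1 + (k : Int)) = s + ((k + 1 : Nat) : Int) by push_cast; ring] at ihh
          rw [ihh]

-- A's deletion loop, for strictly descending Nat indices, is B's filter.
lemma pvFold (L : List Nat) (row : List String) (h : L.Pairwise (fun a b => b < a)) :
    L.foldl (fun r i => r.eraseIdx i) row = pvFilt 0 row (L.map (fun i : Nat => (i : Int))) := by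
  induction L generalizing row with
  | nil =>
      simpa using (pvFilt_all 0 row [] (by intro j hj; cases hj)).symm
  | cons i L ih =>
      simp only [List.foldl_cons, List.map_cons]
      rw [ih (row.eraseIdx i) (List.Pairwise.of_cons h)]
      have hlt : ∀ j ∈ L.map (fun i : Nat => (i : Int)), j < 0 + (i : Int) := by
        simp only [List.mem_map]
        rintro j ⟨n, hn, rfl⟩
        have := (List.pairwise_cons.mp h).1 n hn
        omega
      have := pvFilt_erase row 0 i (L.map (fun i : Nat => (i : Int))) hlt
      rw [this]
      norm_num

-- the filter only depends on the SET of indices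
lemma pvFilt_congr (s : Int) (row : List String) (S T : List Int)
    (h : ∀ n, n ∈ S ↔ n ∈ T) : pvFilt s row S = pvFilt s row T := by
  unfold pvFilt
  congr 1
  apply List.filter_congr
  intro p _
  have : S.contains p.1 = T.contains p.1 := by
    simp only [List.contains_eq_mem]
    exact decide_eq_decide.mpr (h p.1)
  rw [this]

lemma pv_idxOf_inj (header : List String) (c₁ c₂ : String)
    (h₁ : c₁ ∈ header) (h₂ : c₂ ∈ header) (he : header.idxOf c₁ = header.idxOf c₂) : c₁ = c₂ := by
  have l₁ : header.idxOf c₁ < header.length := List.idxOf_lt_length_of_mem h₁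
  have l₂ : header.idxOf c₂ < header.length := List.idxOf_lt_length_of_mem h₂
  have g₁ : header[header.idxOf c₁] = c₁ := List.getElem_idxOf l₁
  have g₂ : header[header.idxOf c₂] = c₂ := List.getElem_idxOf l₂
  rw [← g₁, ← g₂]
  simp only [he]

-- ===== VERDICT (by name: the statement is the Claim_ definition above) =====
theorem remove_columns_spec : Claim_equal_remove_columns := by
  intro dataset header colnames inplace _ hpre
  unfold Spec_remove_columns remove_columns remove_columns_alt
  by_cases hg : (0 < header.length && 0 < colnames.length && colnames.all (fun c => header.contains c)) = true
  · rw [if_pos hg, if_pos hg]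
    have hg' : 0 < header.length ∧ 0 < colnames.length ∧ ∀ c ∈ colnames, c ∈ header := by
      simp only [Bool.and_eq_true, decide_eq_true_eq, List.all_eq_true] at hg
      exact ⟨hg.1.1, hg.1.2, fun c hc => by simpa using hg.2 c hc⟩
    obtain ⟨hnd, hlen⟩ := hpre hg'
    -- A's index list is the plain map
    have hidx : colnames.foldl (fun acc c => acc ++ [header.idxOf c]) [] =
        colnames.map (fun c => header.idxOf c) :=
      by simpa using PySem.List.foldl_append_singleton_eq_map (fun c => header.idxOf c) colnames []
    rw [hidx]
    set idxs0 := colnames.map (fun c => header.idxOf c) with hidxs0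
    set L := PySem.List.sorted idxs0 (fun i => i) true with hL
    -- L is strictly descending
    have hperm : L.Perm idxs0 := PySem.List.sorted_perm idxs0 (fun i => i) true
    have hnd0 : idxs0.Nodup := by
      refine List.Nodup.map_on ?_ hnd
      intro c₁ h₁ c₂ h₂ he
      exact pv_idxOf_inj header c₁ c₂ (hg'.2.2 c₁ h₁) (hg'.2.2 c₂ h₂) he
    have hndL : L.Nodup := hperm.nodup_iff.mpr hnd0
    have hge : L.Pairwise (fun a b => b ≤ a) := PySem.List.sorted_pairwise_rev idxs0 (fun i => i)
    have hdesc : L.Pairwise (fun a b => b < a) := by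
      have := List.Pairwise.and hge hndL
      exact this.imp (fun {a b} hab => lt_of_le_of_ne hab.1 (Ne.symm hab.2))
    -- both sides
    have hmapeq : idxs0.map (fun i : Nat => (i : Int)) = colnames.map (fun c => (header.idxOf c : Int)) := by
      simp [hidxs0, List.map_map, Function.comp]
    have hmem : ∀ n : Int, n ∈ L.map (fun i : Nat => (i : Int)) ↔
        n ∈ colnames.map (fun c => (header.idxOf c : Int)) := by
      intro n
      rw [← hmapeq]
      exact (hperm.map _).mem_iff
    have key : ∀ row : List String,
        L.foldl (fun r i => r.eraseIdx i) row =
        ((PySem.List.enumerate row 0).filter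
          (fun p => !(PySem.Set.contains (PySem.Set.ofList (colnames.map (fun c => (header.idxOf c : Int)))) p.1))).map (fun p => p.2) := by
      intro row
      rw [pvFold L row hdesc]
      have := pvFilt_congr 0 row (L.map (fun i : Nat => (i : Int)))
        (PySem.Set.ofList (colnames.map (fun c => (header.idxOf c : Int))))
        (fun n => (hmem n).trans (PySem.Set.mem_ofList _ n).symm)
      simpa [pvFilt, PySem.Set.contains] using this
    refine congrArg₂ Prod.mk ?_ ?_
    · exact congrArg some (List.map_congr_left (fun row _ => key row))
    · exact congrArg some (key header)
  · rw [if_neg hg, if_neg hg]
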